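-- pv_equiv track=rewrite | github.com/algorithm-studying/daily | 2022_01_19/1_python_송정우.py | solution
-- ===== SOURCE A (Python) =====
-- def solution(s):
--     answer = ''
--     tmp = s.split(' ')  # s에 공백을 포함한 문자가 들어오면 마지막에 그 공백도 출력해줘야 한다.
--                         # s.split()으로 하면 모든 공백을 없애버리기 때문에 100점이 안나왔던 것.
--                         # 출처: https://latte-is-horse.tistory.com/123
--     for i in tmp:
--         for j, v in enumerate(i):
--             if j == 0 or j % 2 == 0:
--                 answer += v.upper()
--                 continue
--             else:
--                 answer += v.lower() # 대문자로 입력받을 경우 필요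
--         answer += ' '
--     return answer[:-1] # 맨 오른쪽 값을 제외하고 모두
-- ===== SOURCE B (Python) =====
-- def solution(s):
--     out = []
--     cnt = 0
--     for c in s:
--         if c == ' ':
--             out.append(' ')
--             cnt = 0
--         else:
--             out.append(c.upper() if cnt % 2 == 0 else c.lower())
--             cnt += 1
--     return ''.join(out)
-- ===== Notes on version B (the rewrite author's own statement) =====
-- stated objective: simpler
-- what changed: Replaced split(' ')/enumerate/trailing-space-strip with a single pass over the characters keeping a position counter that resets at each space, so spaces are emitted in place and no final strip is needed.
import Mathlib
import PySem

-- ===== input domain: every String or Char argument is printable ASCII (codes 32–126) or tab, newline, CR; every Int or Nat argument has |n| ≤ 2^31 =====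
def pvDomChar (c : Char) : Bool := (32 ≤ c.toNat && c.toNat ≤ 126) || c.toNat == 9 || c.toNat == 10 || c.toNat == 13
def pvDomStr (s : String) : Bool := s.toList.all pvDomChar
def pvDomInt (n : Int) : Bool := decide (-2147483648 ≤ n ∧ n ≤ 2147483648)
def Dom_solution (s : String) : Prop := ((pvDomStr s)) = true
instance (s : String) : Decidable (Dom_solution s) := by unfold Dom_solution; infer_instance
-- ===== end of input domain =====

-- B replaces A's split(' ')/enumerate/strip-last-space pipeline with one pass over the
-- characters keeping a position counter reset at each space (objective: simpler).

-- ===== PORT A =====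
-- s.split(' '): the separator " " is nonempty, so Python never raises; split?(s," ") = splitOn s [' '].
def solution (s : String) : String :=
  String.ofList (PySem.Chars.slice                       -- return answer[:-1]
    ((PySem.Chars.splitOn s.toList [' ']).foldl (fun answer i =>
      (PySem.List.enumerate i 0).foldl (fun answer jv =>
        if jv.1 = 0 ∨ PySem.Int.mod jv.1 2 = 0 then answer ++ [PySem.Chars.upperChar jv.2]
        else answer ++ [PySem.Chars.lowerChar jv.2]) answer ++ [' ']) [])
    none (some (-1)))

-- ===== PORT B =====
def solution_alt (s : String) : String :=
  String.ofList (s.toList.foldl (fun (st : List Char × Int) c =>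
    if c = ' ' then (st.1 ++ [' '], 0)
    else (st.1 ++ [if PySem.Int.mod st.2 2 = 0 then PySem.Chars.upperChar c
                   else PySem.Chars.lowerChar c], st.2 + 1)) ([], 0)).1

-- ===== PRECONDITION & SPEC =====
def Spec_solution (s : String) (out : String) : Prop := out = solution_alt s
instance (s : String) (out : String) : Decidable (Spec_solution s out) := by unfold Spec_solution; infer_instance

-- ===== CLAIM (what is proved, stated in full; the proofs are below) =====
def Claim_equal_solution : Prop := ∀ (s : String), Dom_solution s → Spec_solution s (solution s)

-- ===== LEMMAS AND PROOFS =====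

-- reference split on a single space, accumulating the current word in front
def mySplit (pre : List Char) : List Char → List (List Char)
  | [] => [pre]
  | c :: rest => if c = ' ' then pre :: mySplit [] rest else mySplit (pre ++ [c]) rest

-- A's per-word casing by absolute index k
def cw : List Char → Int → List Char
  | [], _ => []
  | c :: cs, k =>
      (if k = 0 ∨ PySem.Int.mod k 2 = 0 then PySem.Chars.upperChar c
       else PySem.Chars.lowerChar c) :: cw cs (k + 1)

-- B's casing with a counter that resets at spaces
def f : List Char → Int → List Char
  | [], _ => []
  | c :: cs, k =>
      if c = ' ' then ' ' :: f cs 0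
      else (if PySem.Int.mod k 2 = 0 then PySem.Chars.upperChar c
            else PySem.Chars.lowerChar c) :: f cs (k + 1)

lemma go_eq (fuel : Nat) : ∀ (l cur : List Char) (acc : List (List Char)),
    l.length < fuel →
    PySem.Chars.splitOn.go [' '] fuel l cur acc = acc.reverse ++ mySplit cur.reverse l := by
  induction fuel with
  | zero => intro l cur acc h; omega
  | succ fuel ih =>
    intro l cur acc h
    cases l with
    | nil => simp [PySem.Chars.splitOn.go, mySplit]
    | cons c rest =>
      by_cases hc : c = ' '
      · subst hc
        simp only [PySem.Chars.splitOn.go, List.isPrefixOf, BEq.rfl, Bool.true_and, if_pos,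
          List.length_cons, List.drop_succ_cons]
        simp only [List.length_nil, List.drop_zero]
        rw [ih rest [] (cur.reverse :: acc) (by simpa using Nat.lt_of_succ_lt_succ h)]
        simp [mySplit]
      · have hpre : [' '].isPrefixOf (c :: rest) = false := by
          simp [List.isPrefixOf]; exact fun h' => hc h'.symm
        simp only [PySem.Chars.splitOn.go, hpre, Bool.false_eq_true, if_neg, not_false_eq_true]
        rw [ih rest (c :: cur) acc (by simpa using Nat.lt_of_succ_lt_succ h)]
        simp [mySplit, hc]

lemma splitOn_space (l : List Char) :
    PySem.Chars.splitOn l [' '] = mySplit [] l := by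
  have := go_eq (l.length + 1) l [] [] (by omega)
  simpa [PySem.Chars.splitOn] using this

lemma wordfold (w : List Char) : ∀ (k : Int) (ans : List Char),
    (PySem.List.enumerate w k).foldl (fun answer jv =>
      if jv.1 = 0 ∨ PySem.Int.mod jv.1 2 = 0 then answer ++ [PySem.Chars.upperChar jv.2]
      else answer ++ [PySem.Chars.lowerChar jv.2]) ans = ans ++ cw w k := by
  induction w with
  | nil => intro k ans; simp [PySem.List.enumerate_nil, cw]
  | cons c cs ih =>
    intro k ans
    rw [PySem.List.enumerate_cons]
    simp only [List.foldl_cons, ih (k + 1), cw]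
    split_ifs <;> simp

lemma foldA_eq (ws : List (List Char)) : ∀ (ans : List Char),
    ws.foldl (fun answer i =>
      (PySem.List.enumerate i 0).foldl (fun answer jv =>
        if jv.1 = 0 ∨ PySem.Int.mod jv.1 2 = 0 then answer ++ [PySem.Chars.upperChar jv.2]
        else answer ++ [PySem.Chars.lowerChar jv.2]) answer ++ [' ']) ans
    = ws.foldl (fun answer w => answer ++ cw w 0 ++ [' ']) ans := by
  induction ws with
  | nil => intro ans; rfl
  | cons w ws ih => intro ans; simp only [List.foldl_cons, wordfold]

lemma cw_append_singleton (xs : List Char) : ∀ (k : Int) (c : Char),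
    cw (xs ++ [c]) k = cw xs k ++
      [if (k + xs.length) = 0 ∨ PySem.Int.mod (k + xs.length) 2 = 0
       then PySem.Chars.upperChar c else PySem.Chars.lowerChar c] := by
  induction xs with
  | nil => intro k c; simp [cw]
  | cons x xs ih =>
    intro k c
    simp only [List.cons_append, cw, ih (k + 1) c, List.length_cons]
    have : k + 1 + (xs.length : Int) = k + ((xs.length : Int) + 1) := by ring
    rw [this]
    push_cast
    ring_nf

lemma bfold (l : List Char) : ∀ (acc : List Char) (k : Int),
    (l.foldl (fun (st : List Char × Int) c =>
      if c = ' ' then (st.1 ++ [' '], 0)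
      else (st.1 ++ [if PySem.Int.mod st.2 2 = 0 then PySem.Chars.upperChar c
                     else PySem.Chars.lowerChar c], st.2 + 1)) (acc, k)).1
    = acc ++ f l k := by
  induction l with
  | nil => intro acc k; simp [f]
  | cons c cs ih =>
    intro acc k
    by_cases hc : c = ' '
    · subst hc; simp only [List.foldl_cons, f]; rw [ih]; simp
    · simp only [List.foldl_cons, if_neg hc, f]; rw [ih]; simp

lemma natCast_zero_or_mod (n : Nat) :
    (((n : Int) = 0 ∨ PySem.Int.mod (n : Int) 2 = 0) ↔ PySem.Int.mod (n : Int) 2 = 0) := by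
  constructor
  · rintro (h | h)
    · rw [h]; decide
    · exact h
  · exact Or.inr

lemma mainA (l : List Char) : ∀ (pre ans : List Char),
    (mySplit pre l).foldl (fun answer w => answer ++ cw w 0 ++ [' ']) ans
    = ans ++ cw pre 0 ++ f l (pre.length : Int) ++ [' '] := by
  induction l with
  | nil => intro pre ans; simp [mySplit, f]
  | cons c rest ih =>
    intro pre ans
    by_cases hc : c = ' '
    · subst hc
      rw [show mySplit pre (' ' :: rest) = pre :: mySplit [] rest from by simp [mySplit]]
      rw [List.foldl_cons, ih [] (ans ++ cw pre 0 ++ [' '])]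
      rw [show f (' ' :: rest) (pre.length : Int) = ' ' :: f rest 0 from by simp [f]]
      simp [cw]
    · rw [show mySplit pre (c :: rest) = mySplit (pre ++ [c]) rest from by simp [mySplit, hc]]
      rw [ih (pre ++ [c]) ans, cw_append_singleton pre 0 c]
      rw [show f (c :: rest) (pre.length : Int)
            = (if PySem.Int.mod (pre.length : Int) 2 = 0 then PySem.Chars.upperChar c
               else PySem.Chars.lowerChar c) :: f rest ((pre.length : Int) + 1) from by
        simp [f, hc]]
      simp only [zero_add, natCast_zero_or_mod]
      rw [show (((pre ++ [c]).length : Nat) : Int) = ((pre.length : Nat) : Int) + 1 from by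
        simp]
      simp only [List.append_assoc, List.cons_append, List.nil_append]

lemma slice_drop_last (l : List Char) :
    PySem.Chars.slice (l ++ [' ']) none (some (-1)) = l := by
  simp [pysem]

-- ===== VERDICT (by name: the statement is the Claim_ definition above) =====
theorem solution_spec : Claim_equal_solution := by
  intro s _
  unfold Spec_solution solution solution_alt
  rw [splitOn_space, foldA_eq, mainA s.toList [] [], bfold s.toList [] 0]
  simp only [cw, List.nil_append, List.length_nil, Nat.cast_zero]
  rw [slice_drop_last]
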